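-- pv_equiv track=rewrite | github.com/alexandraback/datacollection | solutions_5631989306621952_0/Python/romd/lastWord.py | do_case
-- ===== SOURCE A (Python) =====
-- def do_case(input):
--         if(input==""):
--                 return ""
--         cutI=input.find(max(input))
--         st=do_case(input[:cutI])
--         for ch in input[cutI:]:
--                 if ch==input[cutI]:
--                         st=ch+st
--                 else:
--                         st=st+ch
--         return str(st)
-- ===== SOURCE B (Python) =====
-- def do_case(input):
--     st = ""
--     for ch in input:
--         if st and ch >= st[0]:
--             st = ch + st
--         else:
--             st = st + ch
--     return st
-- ===== Notes on version B (the rewrite author's own statement) =====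
-- stated objective: simpler
-- what changed: Replaced A's recursive divide-at-the-first-maximum (rescanning with max/find and slicing at every level) by a single left-to-right greedy pass that prepends ch when ch >= the current first character and appends it otherwise.
import Mathlib
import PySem

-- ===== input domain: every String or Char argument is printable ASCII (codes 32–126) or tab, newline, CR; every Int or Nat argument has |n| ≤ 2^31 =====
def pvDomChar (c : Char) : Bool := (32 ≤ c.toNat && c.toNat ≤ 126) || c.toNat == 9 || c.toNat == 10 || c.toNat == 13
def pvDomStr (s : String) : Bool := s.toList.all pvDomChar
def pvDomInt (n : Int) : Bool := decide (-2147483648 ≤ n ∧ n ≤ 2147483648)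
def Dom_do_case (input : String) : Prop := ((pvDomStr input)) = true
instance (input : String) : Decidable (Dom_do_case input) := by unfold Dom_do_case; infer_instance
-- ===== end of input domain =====

-- B replaces A's recursive split-at-the-max with one left-to-right greedy pass
-- (prepend if ch >= current first char, else append); objective: simpler.

-- ===== PORT A =====
-- A's recursion, on the code-point list of the string.
-- `max(input)` → PySem.List.max? (none only for ""), `input.find(max(input))` →
-- PySem.List.index? (the max is a member, so find never returns -1; the `none`
-- branches are unreachable).  The loop compares `ch == input[cutI]`; by the
-- definition of cutI, input[cutI] IS m, so the comparison is written `ch = m`.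
def do_case_go (cs : List Char) : List Char :=
  match _hm : PySem.List.max? cs (fun c => c) with
  | none => []                      -- input == "" → return ""
  | some m =>
    match _hi : PySem.List.index? cs m with
    | none => []                    -- unreachable: m ∈ cs
    | some cutI =>
      -- st = do_case(input[:cutI]); then the for-loop over input[cutI:]
      (cs.drop cutI).foldl
        (fun st ch => if ch = m then ch :: st else st ++ [ch])
        (do_case_go (cs.take cutI))
termination_by cs.length
decreasing_by
  obtain ⟨hk, -, -⟩ := PySem.List.getElem_of_index?_eq_some _hi
  simp
  omega

def do_case (input : String) : String := String.ofList (do_case_go input.toList)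

-- ===== PORT B =====
-- one step of B's loop: `if st and ch >= st[0]: st = ch + st else: st = st + ch`
def do_case_step (st : List Char) (ch : Char) : List Char :=
  match st with
  | [] => [ch]
  | c :: t => if c ≤ ch then ch :: c :: t else (c :: t) ++ [ch]

def do_case_alt (input : String) : String :=
  String.ofList (input.toList.foldl do_case_step [])

-- ===== PRECONDITION & SPEC =====
def Spec_do_case (input : String) (out : String) : Prop := out = do_case_alt input
instance (input : String) (out : String) : Decidable (Spec_do_case input out) := by unfold Spec_do_case; infer_instance

-- ===== CLAIM (what is proved, stated in full; the proofs are below) =====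
def Claim_equal_do_case : Prop := ∀ (input : String), Dom_do_case input → Spec_do_case input (do_case input)

-- ===== LEMMAS AND PROOFS =====

-- membership through B's step and fold
theorem mem_do_case_step {x ch : Char} {st : List Char} :
    x ∈ do_case_step st ch ↔ x ∈ st ∨ x = ch := by
  cases st with
  | nil => simp [do_case_step]
  | cons c t =>
    simp only [do_case_step]
    split <;> simp <;> tauto

theorem mem_foldl_do_case_step {x : Char} (cs : List Char) (st : List Char) :
    x ∈ cs.foldl do_case_step st ↔ x ∈ st ∨ x ∈ cs := by
  induction cs generalizing st with
  | nil => simp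
  | cons c t ih =>
    simp only [List.foldl_cons, ih, mem_do_case_step, List.mem_cons]
    tauto

-- while the head is the maximum m and every remaining char is ≤ m,
-- B's step coincides with A's loop body
theorem foldl_step_eq_loop (m : Char) (suf : List Char) :
    ∀ st : List Char, st.head? = some m → (∀ c ∈ suf, c ≤ m) →
    suf.foldl do_case_step st =
      suf.foldl (fun st ch => if ch = m then ch :: st else st ++ [ch]) st := by
  induction suf with
  | nil => intro st _ _; rfl
  | cons ch rest ih =>
    intro st hhd hle
    obtain ⟨t, rfl⟩ : ∃ t, st = m :: t := by
      cases st with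
      | nil => simp at hhd
      | cons a t => exact ⟨t, by simpa using congrArg (fun o => (o.getD a) :: t) hhd⟩
    have hch : ch ≤ m := hle ch (by simp)
    by_cases hcm : ch = m
    · subst hcm
      simp only [List.foldl_cons, do_case_step, if_pos le_rfl]
      exact ih (ch :: ch :: t) rfl (fun c hc => hle c (by simp [hc]))
    · have hlt : ¬ m ≤ ch := fun h => hcm (le_antisymm hch h)
      simp only [List.foldl_cons, do_case_step, if_neg hlt, if_neg hcm]
      exact ih ((m :: t) ++ [ch]) rfl (fun c hc => hle c (by simp [hc]))

-- the core equivalence, by strong induction on the length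
theorem do_case_go_eq (cs : List Char) :
    do_case_go cs = cs.foldl do_case_step [] := by
  induction hn : cs.length using Nat.strong_induction_on generalizing cs with
  | _ n ih =>
  subst hn
  rw [do_case_go]
  split
  next hm =>
    have : cs = [] := (PySem.List.max?_eq_none_iff cs (fun c => c)).mp hm
    subst this; rfl
  next m hm =>
    split
    next hi =>
      exact absurd (PySem.List.max?_mem hm)
        ((PySem.List.index?_eq_none_iff cs m).mp hi)
    next cutI hi =>
      obtain ⟨hk, hget, hbefore⟩ := PySem.List.getElem_of_index?_eq_some hi
      have hmax : ∀ y ∈ cs, y ≤ m := by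
        have := PySem.List.max?_isMax hm; simpa using this
      -- split cs at cutI
      have hdrop : cs.drop cutI = m :: cs.drop (cutI + 1) := by
        rw [List.drop_eq_getElem_cons hk, hget]
      have hsplit : cs = cs.take cutI ++ cs.drop cutI := (List.take_append_drop _ _).symm
      have hlen_take : (cs.take cutI).length = cutI := by simp; omega
      -- induction hypothesis on the prefix
      have ihpre : do_case_go (cs.take cutI) = (cs.take cutI).foldl do_case_step [] :=
        ih (cs.take cutI).length (by rw [hlen_take]; omega) _ rfl
      -- B's fold over cs, split at cutI
      have hB : cs.foldl do_case_step [] =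
          (cs.drop cutI).foldl do_case_step ((cs.take cutI).foldl do_case_step []) := by
        conv_lhs => rw [hsplit]
        rw [List.foldl_append]
      set d := (cs.take cutI).foldl do_case_step [] with hd
      -- chars of the prefix sit in d and are ≤ m
      have hdle : ∀ c ∈ d, c ≤ m := by
        intro c hc
        rcases (mem_foldl_do_case_step _ _).mp hc with h | h
        · simp at h
        · exact hmax c (List.mem_of_mem_take h)
      -- B's first step on the pivot prepends it
      have hstep : do_case_step d m = m :: d := by
        cases hdc : d with
        | nil => rfl
        | cons c t =>
          have : c ≤ m := hdle c (by rw [hdc]; simp)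
          simp [do_case_step, this]
      have hsufle : ∀ c ∈ cs.drop (cutI + 1), c ≤ m :=
        fun c hc => hmax c (List.mem_of_mem_drop hc)
      calc (cs.drop cutI).foldl
              (fun st ch => if ch = m then ch :: st else st ++ [ch])
              (do_case_go (cs.take cutI))
          = (cs.drop (cutI + 1)).foldl
              (fun st ch => if ch = m then ch :: st else st ++ [ch]) (m :: d) := by
            rw [hdrop, ihpre]; simp
        _ = (cs.drop (cutI + 1)).foldl do_case_step (m :: d) :=
            (foldl_step_eq_loop m _ (m :: d) rfl hsufle).symm
        _ = cs.foldl do_case_step [] := by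
            rw [hB, hdrop, List.foldl_cons, hstep]

-- ===== VERDICT (by name: the statement is the Claim_ definition above) =====
theorem do_case_spec : Claim_equal_do_case := by
  intro input _
  unfold Spec_do_case do_case do_case_alt
  rw [do_case_go_eq]
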